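-- pv_equiv track=rewrite | github.com/kiran12ds/projects | Python/Scrabble game.py | word_is_valid
-- ===== SOURCE A (Python) =====
-- def word_is_valid(word, hand, word_list):
--     """
--     Returns boolean
--     if all the letters in the word played are in the hand
--     and
--     if the word is in the wordlist
--     returns true
--     if either false, returns false
--     word: string
--     hand: dictionary (string -> int)
--     word_list: list of lowercase words
--     """
--      # Check if the word is in the word list
--     if word not in word_list:
--         return False
--
--     # Check if the hand has enough letters for the word
--     hand_copy = hand.copy()  # Make a copy to avoid modifying the original hand
--     for letter in word:
--         if hand_copy.get(letter, 0) <= 0: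
--             return False
--         hand_copy[letter] -= 1
--
--     return True
-- ===== SOURCE B (Python) =====
-- def word_is_valid(word, hand, word_list):
--     if word not in word_list:
--         return False
--     need = {}
--     for c in word:
--         need[c] = need.get(c, 0) + 1
--     return all(n <= hand.get(c, 0) for c, n in need.items())
-- ===== Notes on version B (the rewrite author's own statement) =====
-- stated objective: simpler
-- what changed: Replaces the mutable hand-copy-and-decrement loop (early exit per letter) with a frequency table of the word's letters compared once against the untouched hand.
import Mathlib
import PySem

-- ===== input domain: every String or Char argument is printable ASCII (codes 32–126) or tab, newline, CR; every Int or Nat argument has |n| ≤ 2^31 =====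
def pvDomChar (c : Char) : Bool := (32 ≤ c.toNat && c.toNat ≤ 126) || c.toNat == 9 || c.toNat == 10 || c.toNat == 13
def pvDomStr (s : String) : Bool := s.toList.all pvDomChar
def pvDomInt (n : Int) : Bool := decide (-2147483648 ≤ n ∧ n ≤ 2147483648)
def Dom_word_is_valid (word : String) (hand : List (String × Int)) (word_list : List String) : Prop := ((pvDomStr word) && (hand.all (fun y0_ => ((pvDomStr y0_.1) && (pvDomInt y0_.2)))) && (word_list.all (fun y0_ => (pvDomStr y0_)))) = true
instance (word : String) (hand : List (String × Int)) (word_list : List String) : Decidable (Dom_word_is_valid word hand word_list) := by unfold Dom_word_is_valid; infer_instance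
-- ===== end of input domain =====

-- B replaces A's mutable hand-copy-and-decrement loop by a frequency table of the
-- word's letters compared once against the untouched hand (objective: simpler).

-- ===== PORT A =====
-- the 'for letter in word' loop: early False when the remaining count is ≤ 0,
-- otherwise decrement ('hand_copy[letter] -= 1'; the guard guarantees the key is
-- present with getD > 0, so the overwrite-in-place is Dict.insert — exact here).
def wivLoopA : List Char → PySem.Dict String Int → Bool
  | [], _ => true
  | c :: cs, d =>
    if d.getD (String.ofList [c]) 0 ≤ 0 then false
    else wivLoopA cs (d.insert (String.ofList [c]) (d.getD (String.ofList [c]) 0 - 1))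

def word_is_valid (word : String) (hand : List (String × Int)) (word_list : List String) : Bool :=
  if !(word_list.contains word) then false
  else wivLoopA word.toList (PySem.Dict.mk hand)  -- hand.copy(): the copy is the starting state

-- ===== PORT B =====
def word_is_valid_alt (word : String) (hand : List (String × Int)) (word_list : List String) : Bool :=
  if !(word_list.contains word) then false
  else
    -- need = {}; for c in word: need[c] = need.get(c, 0) + 1
    let need := word.toList.foldl
      (fun d c => d.insert (String.ofList [c]) (d.getD (String.ofList [c]) 0 + 1))
      PySem.Dict.empty
    -- all(n <= hand.get(c, 0) for c, n in need.items())
    need.items.all (fun kv => decide (kv.2 ≤ (PySem.Dict.mk hand).getD kv.1 0))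

-- ===== PRECONDITION & SPEC =====
def Spec_word_is_valid (word : String) (hand : List (String × Int)) (word_list : List String) (out : Bool) : Prop := out = word_is_valid_alt word hand word_list
instance (word : String) (hand : List (String × Int)) (word_list : List String) (out : Bool) : Decidable (Spec_word_is_valid word hand word_list out) := by unfold Spec_word_is_valid; infer_instance

-- ===== CLAIM (what is proved, stated in full; the proofs are below) =====
def Claim_equal_word_is_valid : Prop := ∀ (word : String) (hand : List (String × Int)) (word_list : List String), Dom_word_is_valid word hand word_list → Spec_word_is_valid word hand word_list (word_is_valid word hand word_list)

-- ===== LEMMAS AND PROOFS =====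

theorem sChar_injective : Function.Injective (fun c : Char => String.ofList [c]) := by
  intro a b h
  have := congrArg String.toList h
  simpa using this

-- A's loop succeeds iff every letter of the remaining suffix occurs in it no more
-- often than its current count in the working dict.
theorem wivLoopA_eq (cs : List Char) (d : PySem.Dict String Int) :
    wivLoopA cs d
      = decide (∀ c ∈ cs, (cs.count c : Int) ≤ d.getD (String.ofList [c]) 0) := by
  induction cs generalizing d with
  | nil => simp [wivLoopA]
  | cons c cs ih =>
    simp only [wivLoopA]
    by_cases hg : d.getD (String.ofList [c]) 0 ≤ 0
    · rw [if_pos hg, eq_comm, decide_eq_false_iff_not]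
      intro h
      have h1 := h c (by simp)
      have h2 : 1 ≤ (c :: cs).count c := by simp
      have h3 : (1 : Int) ≤ ((c :: cs).count c : Int) := by exact_mod_cast h2
      omega
    · rw [if_neg hg, ih, decide_eq_decide]
      constructor
      · intro h b hb
        rcases List.mem_cons.mp hb with rfl | hbs
        · by_cases hmem : b ∈ cs
          · have hh := h b hmem
            rw [PySem.Dict.getD_insert, if_pos rfl] at hh
            have hcnt : (b :: cs).count b = cs.count b + 1 := by simp
            rw [hcnt]
            push_cast
            omega
          · have hcnt : (b :: cs).count b = 1 := by
              simp [List.count_eq_zero_of_not_mem hmem]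
            rw [hcnt]
            omega
        · by_cases hbc : b = c
          · subst hbc
            have hh := h b hbs
            rw [PySem.Dict.getD_insert, if_pos rfl] at hh
            have hcnt : (b :: cs).count b = cs.count b + 1 := by simp
            rw [hcnt]
            push_cast
            omega
          · have hh := h b hbs
            rw [PySem.Dict.getD_insert,
                if_neg (fun he => hbc (sChar_injective he))] at hh
            have hcnt : (c :: cs).count b = cs.count b := by
              simp [List.count_cons]
              exact fun he => hbc he.symm
            rw [hcnt]
            exact hh
      · intro h b hb
        rw [PySem.Dict.getD_insert]
        by_cases hbc : b = c
        · subst hbc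
          have hh := h b (by simp)
          rw [if_pos rfl]
          have hcnt : (b :: cs).count b = cs.count b + 1 := by simp
          rw [hcnt] at hh
          push_cast at hh
          omega
        · rw [if_neg (fun he => hbc (sChar_injective he))]
          have hh := h b (List.mem_cons_of_mem _ hb)
          have hcnt : (c :: cs).count b = cs.count b := by
            simp [List.count_cons]
            exact fun he => hbc he.symm
          rw [hcnt] at hh
          exact hh

-- B's table comparison says exactly the same thing.
theorem alt_check_eq (word : String) (hand : List (String × Int)) :
    ((word.toList.foldl
        (fun d c => d.insert (String.ofList [c]) (d.getD (String.ofList [c]) 0 + 1))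
        PySem.Dict.empty).items.all
      (fun kv => decide (kv.2 ≤ (PySem.Dict.mk hand).getD kv.1 0)))
      = decide (∀ c ∈ word.toList,
          (word.toList.count c : Int) ≤ (PySem.Dict.mk hand).getD (String.ofList [c]) 0) := by
  have hfold :
      word.toList.foldl
        (fun d c => d.insert (String.ofList [c]) (d.getD (String.ofList [c]) 0 + 1))
        PySem.Dict.empty
      = PySem.Dict.counter (word.toList.map (fun c => String.ofList [c])) := by
    rw [← PySem.Dict.foldl_insert_getD_add_one_eq_counter, List.foldl_map]
  rw [hfold, PySem.Dict.items_counter, List.all_map]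
  simp only [Function.comp_def]
  rcases Bool.eq_false_or_eq_true
      (decide (∀ c ∈ word.toList,
        (word.toList.count c : Int) ≤ (PySem.Dict.mk hand).getD (String.ofList [c]) 0)) with hdec | hdec <;>
    rw [hdec]
  · rw [List.all_eq_true]
    rw [decide_eq_true_eq] at hdec
    intro k hk
    rw [PySem.Set.mem_ofList] at hk
    obtain ⟨c, hc, rfl⟩ := List.mem_map.mp hk
    simp only [decide_eq_true_eq]
    rw [List.count_map_of_injective _ _ sChar_injective]
    exact hdec c hc
  · rw [List.all_eq_false]
    rw [decide_eq_false_iff_not] at hdec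
    push Not at hdec
    obtain ⟨c, hc, hlt⟩ := hdec
    refine ⟨String.ofList [c], ?_, ?_⟩
    · rw [PySem.Set.mem_ofList]
      exact List.mem_map_of_mem hc
    · simp only [decide_eq_true_eq, List.count_map_of_injective _ _ sChar_injective, not_le]
      omega

-- ===== VERDICT (by name: the statement is the Claim_ definition above) =====
theorem word_is_valid_spec : Claim_equal_word_is_valid := by
  intro word hand word_list _
  unfold Spec_word_is_valid
  simp only [word_is_valid, word_is_valid_alt, wivLoopA_eq, alt_check_eq]
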